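-- pv_equiv track=rewrite | github.com/leov2000/is499-data | format_quality_data.py | filter_attrs
-- ===== SOURCE A (Python) =====
-- def create_dict(key_list, val_list):
--     return dict(zip(key_list, val_list))
--
-- def filter_attrs(csv_list):
--     file_dict = {}
--     header = csv_list.pop(0)
--
--     for row in csv_list:
--         dict_key = row[0]
--         year_key = row[3]
--         grade_type = row[2]
--
--         if (
--             dict_key in file_dict
--             and (year_key == "2016-17" or year_key == "2017-18")
--             and grade_type == "All Grades"
--         ):
--             file_dict[dict_key].append(create_dict(header, row))
--
--         elif (
--             dict_key not in file_dict
--             and (year_key == "2016-17" or year_key == "2017-18")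
--             and grade_type == "All Grades"
--         ):
--             file_dict[dict_key] = []
--             file_dict[dict_key].append(create_dict(header, row))
--
--     return file_dict
-- ===== SOURCE B (Python) =====
-- def create_dict(key_list, val_list):
--     return dict(zip(key_list, val_list))
--
-- def filter_attrs(csv_list):
--     header = csv_list.pop(0)
--     rows = [r for r in csv_list
--             if r[2] == "All Grades" and r[3] in ("2016-17", "2017-18")]
--     keys = dict.fromkeys(r[0] for r in rows)
--     return {k: [create_dict(header, r) for r in rows if r[0] == k] for k in keys}
-- ===== Notes on version B (the rewrite author's own statement) =====
-- stated objective: alternative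
-- what changed: A builds the grouping dict in one pass with per-row membership tests and in-place appends; B first filters the matching rows, dedups the keys in first-occurrence order, and builds each key's group by a per-key comprehension scan over the filtered rows.
import Mathlib
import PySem

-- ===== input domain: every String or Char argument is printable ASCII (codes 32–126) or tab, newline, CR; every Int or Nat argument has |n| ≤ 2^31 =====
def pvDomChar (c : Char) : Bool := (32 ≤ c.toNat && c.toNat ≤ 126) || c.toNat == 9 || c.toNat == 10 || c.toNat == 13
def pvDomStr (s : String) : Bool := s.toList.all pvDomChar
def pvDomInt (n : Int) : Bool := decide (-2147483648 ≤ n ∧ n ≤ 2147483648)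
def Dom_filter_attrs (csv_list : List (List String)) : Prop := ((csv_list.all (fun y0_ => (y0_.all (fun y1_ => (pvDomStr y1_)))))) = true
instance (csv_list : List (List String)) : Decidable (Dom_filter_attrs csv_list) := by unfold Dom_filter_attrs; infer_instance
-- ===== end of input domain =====

-- B replaces A's one-pass hash accumulation with filter → ordered key dedup → per-key
-- comprehension scans (objective: alternative decomposition, same return value).
-- Both A and B mutate the argument the same way (csv_list.pop(0)); the theorems are about the return value.

-- ===== PORT A =====
-- create_dict(key_list, val_list) = dict(zip(key_list, val_list))
def create_dict (key_list val_list : List String) : List (String × String) :=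
  (PySem.Dict.ofList (List.zip key_list val_list)).items

def filter_attrs (csv_list : List (List String)) : List (String × List (List (String × String))) :=
  match csv_list with
  | [] => []  -- csv_list.pop(0) raises IndexError here; excluded by Pre_
  | header :: rest =>
    (rest.foldl (fun file_dict row =>
        let dict_key := PySem.List.pyGetD row 0 ""
        let year_key := PySem.List.pyGetD row 3 ""
        let grade_type := PySem.List.pyGetD row 2 ""
        if file_dict.contains dict_key &&
           (year_key == "2016-17" || year_key == "2017-18") &&
           grade_type == "All Grades" then
          -- file_dict[dict_key].append(create_dict(header, row))
          file_dict.modify dict_key [] (· ++ [create_dict header row])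
        else if !file_dict.contains dict_key &&
           (year_key == "2016-17" || year_key == "2017-18") &&
           grade_type == "All Grades" then
          -- file_dict[dict_key] = []; file_dict[dict_key].append(create_dict(header, row))
          (file_dict.insert dict_key []).modify dict_key [] (· ++ [create_dict header row])
        else file_dict)
      (PySem.Dict.empty : PySem.Dict String (List (List (String × String))))).items

-- ===== PORT B =====
def create_dict_alt (key_list val_list : List String) : List (String × String) :=
  (PySem.Dict.ofList (List.zip key_list val_list)).items

def filter_attrs_alt (csv_list : List (List String)) : List (String × List (List (String × String))) :=
  match csv_list with
  | [] => []  -- csv_list.pop(0) raises IndexError here; excluded by Pre_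
  | header :: rest =>
    let rows := rest.filter (fun r =>
      PySem.List.pyGetD r 2 "" == "All Grades" &&
      (PySem.List.pyGetD r 3 "" == "2016-17" || PySem.List.pyGetD r 3 "" == "2017-18"))
    let keys := PySem.List.dedup (rows.map (fun r => PySem.List.pyGetD r 0 ""))
    -- {k: [create_dict(header, r) for r in rows if r[0] == k] for k in keys}
    (keys.foldl (fun d k =>
        d.insert k ((rows.filter (fun r => PySem.List.pyGetD r 0 "" == k)).map
          (fun r => create_dict_alt header r)))
      (PySem.Dict.empty : PySem.Dict String (List (List (String × String))))).items

-- ===== PRECONDITION & SPEC =====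
-- Pre_ excludes exactly the inputs where A raises IndexError: the empty list (pop(0))
-- and any data row with fewer than 4 columns (row[3] / row[2] / row[0]).
def Pre_filter_attrs (csv_list : List (List String)) : Prop :=
  csv_list ≠ [] ∧ ∀ row ∈ csv_list.tail, 4 ≤ row.length
instance (csv_list : List (List String)) : Decidable (Pre_filter_attrs csv_list) := by unfold Pre_filter_attrs; infer_instance

def pvWitness_filter_attrs : List (List String) :=
  [["school", "id", "grade", "year"],
   ["a", "1", "All Grades", "2016-17"],
   ["b", "2", "All Grades", "2017-18"],
   ["a", "3", "All Grades", "2017-18"],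
   ["a", "4", "Grade 3", "2016-17"]]

def Spec_filter_attrs (csv_list : List (List String)) (out : List (String × List (List (String × String)))) : Prop := out = filter_attrs_alt csv_list
instance (csv_list : List (List String)) (out : List (String × List (List (String × String)))) : Decidable (Spec_filter_attrs csv_list out) := by unfold Spec_filter_attrs; infer_instance

-- ===== CLAIM (what is proved, stated in full; the proofs are below) =====
def Claim_equal_filter_attrs : Prop := ∀ (csv_list : List (List String)), Dom_filter_attrs csv_list → Pre_filter_attrs csv_list → Spec_filter_attrs csv_list (filter_attrs csv_list)

-- ===== LEMMAS AND PROOFS =====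

-- abbreviations used only by the proofs
def pvP (r : List String) : Bool :=
  PySem.List.pyGetD r 2 "" == "All Grades" &&
  (PySem.List.pyGetD r 3 "" == "2016-17" || PySem.List.pyGetD r 3 "" == "2017-18")

def pvKey (r : List String) : String := PySem.List.pyGetD r 0 ""

lemma pv_insert_modify {d : PySem.Dict String (List (List (String × String)))}
    {k : String} (h : d.contains k = false) (v : List (String × String)) :
    (d.insert k []).modify k [] (· ++ [v]) = d.modify k [] (· ++ [v]) := by
  simp [PySem.Dict.modify, PySem.Dict.getD_insert_self, PySem.Dict.insert_insert_self,
        PySem.Dict.getD_of_not_contains d ([] : List (List (String × String))) h]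

-- A's loop is the unconditional modify-loop over the filtered rows
lemma pv_foldA (header : List String) (rest : List (List String))
    (d : PySem.Dict String (List (List (String × String)))) :
    rest.foldl (fun file_dict row =>
        let dict_key := PySem.List.pyGetD row 0 ""
        let year_key := PySem.List.pyGetD row 3 ""
        let grade_type := PySem.List.pyGetD row 2 ""
        if file_dict.contains dict_key &&
           (year_key == "2016-17" || year_key == "2017-18") &&
           grade_type == "All Grades" then
          file_dict.modify dict_key [] (· ++ [create_dict header row])
        else if !file_dict.contains dict_key &&
           (year_key == "2016-17" || year_key == "2017-18") &&
           grade_type == "All Grades" then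
          (file_dict.insert dict_key []).modify dict_key [] (· ++ [create_dict header row])
        else file_dict) d
      = (rest.filter pvP).foldl
          (fun d r => d.modify (pvKey r) [] (· ++ [create_dict header r])) d := by
  induction rest generalizing d with
  | nil => rfl
  | cons r rs ih =>
    simp only [List.foldl_cons, List.filter_cons]
    have hcomm : ∀ c : Bool,
        (c && (PySem.List.pyGetD r 3 "" == "2016-17" || PySem.List.pyGetD r 3 "" == "2017-18") &&
          (PySem.List.pyGetD r 2 "" == "All Grades")) = (c && pvP r) := by
      intro c
      simp only [pvP, Bool.and_assoc]
      cases c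
      · rfl
      · simp only [Bool.true_and]
        exact Bool.and_comm _ _
    simp only [hcomm]
    cases hpv : pvP r with
    | false =>
      simp only [Bool.and_false, Bool.false_eq_true, if_false]
      exact ih d
    | true =>
      simp only [Bool.and_true, if_true]
      cases hc : (d.contains (PySem.List.pyGetD r 0 "")) with
      | true =>
        simp only [if_true]
        rw [List.foldl_cons]
        exact ih _
      | false =>
        simp only [Bool.not_false, Bool.false_eq_true, if_false, if_true]
        rw [List.foldl_cons, show (pvKey r) = PySem.List.pyGetD r 0 "" from rfl, ← pv_insert_modify hc]
        exact ih _

-- the common group value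
lemma pv_getD_group (header : List String) (ms : List (List String)) (c : String) :
    ((ms.foldl (fun d r => d.modify (pvKey r) [] (· ++ [create_dict header r]))
        (PySem.Dict.empty : PySem.Dict String (List (List (String × String))))).getD c [])
      = (ms.filter (fun r => pvKey r == c)).map (fun r => create_dict header r) := by
  have h := PySem.Dict.getD_foldl_modify_append
      (ms.map (fun r => (pvKey r, create_dict header r)))
      (PySem.Dict.empty : PySem.Dict String (List (List (String × String)))) c
  rw [List.foldl_map] at h
  simpa [List.filter_map, Function.comp] using h

-- ===== VERDICT (by name: the statement is the Claim_ definition above) =====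
theorem filter_attrs_spec : Claim_equal_filter_attrs := by
  intro csv_list _ _
  unfold Spec_filter_attrs
  match csv_list with
  | [] => rfl
  | header :: rest =>
    show filter_attrs (header :: rest) = filter_attrs_alt (header :: rest)
    simp only [filter_attrs, filter_attrs_alt]
    rw [pv_foldA]
    set ms := rest.filter pvP with hms
    have hfilter : rest.filter (fun r =>
        PySem.List.pyGetD r 2 "" == "All Grades" &&
        (PySem.List.pyGetD r 3 "" == "2016-17" || PySem.List.pyGetD r 3 "" == "2017-18")) = ms := rfl
    rw [hfilter]
    set D := ms.foldl (fun d r => d.modify (pvKey r) [] (· ++ [create_dict header r]))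
        (PySem.Dict.empty : PySem.Dict String (List (List (String × String)))) with hD
    -- keys of A's dict
    have hkeys : D.keys = PySem.List.dedup (ms.map pvKey) := by
      rw [hD, PySem.Dict.keys_foldl_modify_key ms pvKey [] (fun d r => (· ++ [create_dict header r]))]
      rw [PySem.List.dedup_eq_ofList]
      simp [PySem.Set.update, PySem.Set.ofList_eq_foldl, PySem.Dict.keys_empty]
    have hnd : D.keys.Nodup := by
      rw [hD]
      exact PySem.Dict.nodup_keys_foldl_modify_key ms pvKey [] _ _ PySem.Dict.nodup_keys_empty
    have hA : D.items = (PySem.List.dedup (ms.map pvKey)).map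
        (fun k => (k, (ms.filter (fun r => pvKey r == k)).map (fun r => create_dict header r))) := by
      rw [PySem.Dict.items_eq_map_keys D hnd [], hkeys]
      refine List.map_congr_left (fun k _ => ?_)
      rw [hD, pv_getD_group]
    have hB : ((PySem.List.dedup (ms.map (fun r => PySem.List.pyGetD r 0 ""))).foldl
        (fun d k => d.insert k ((ms.filter (fun r => PySem.List.pyGetD r 0 "" == k)).map
          (fun r => create_dict_alt header r)))
        (PySem.Dict.empty : PySem.Dict String (List (List (String × String))))).items
        = (PySem.List.dedup (ms.map pvKey)).map
          (fun k => (k, (ms.filter (fun r => pvKey r == k)).map (fun r => create_dict header r))) := by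
      rw [PySem.Dict.items_foldl_insert_fresh
        (PySem.List.dedup (ms.map (fun r => PySem.List.pyGetD r 0 "")))
        (fun x => x)
        (fun k => (ms.filter (fun r => PySem.List.pyGetD r 0 "" == k)).map (fun r => create_dict_alt header r))
        PySem.Dict.empty (by simp [PySem.Dict.contains_empty])
        (by simp)]
      simp [pvKey, create_dict_alt, create_dict, PySem.Dict.empty]
      rfl
    rw [hA]
    exact hB.symm
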